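-- pv_equiv track=rewrite | github.com/ramchandra3101/Leetcode_Everyday | SameString.py | SameSubstring
-- ===== SOURCE A (Python) =====
-- def SameSubstring(s,t,k):
--     left =0
--     currentCost =0
--     maxLen = 0
--     for right in range(len(s)):
--         currentCost += abs(ord(s[right]) - ord(t[right])) #calclulate current cost for each diiefernce using Sliding window
--         while currentCost > k:
--             currentCost -= abs(ord(s[left]) - ord(t[left])) #shrink the window from left
--             left += 1
--         maxLen = max(maxLen, right - left + 1) # Even if window shrinks we will still check the max length
--     return maxLen
-- ===== SOURCE B (Python) =====
-- def SameSubstring(s, t, k):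
--     n = len(s)
--     costs = [abs(ord(s[i]) - ord(t[i])) for i in range(n)]
--     pref = [0]
--     for x in costs:
--         pref.append(pref[-1] + x)
--     def feasible(L):
--         return any(pref[i + L] - pref[i] <= k for i in range(n - L + 1))
--     lo, hi = 0, n
--     while lo < hi:
--         mid = (lo + hi + 1) // 2
--         if feasible(mid):
--             lo = mid
--         else:
--             hi = mid - 1
--     return lo
-- ===== Notes on version B (the rewrite author's own statement) =====
-- stated objective: alternative
-- what changed: Replaced A's one-pass two-pointer sliding window by a cost/prefix-sum table plus a binary search over the answer length, using the monotonicity of 'some window of length L has cost <= k'.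
import Mathlib
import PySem

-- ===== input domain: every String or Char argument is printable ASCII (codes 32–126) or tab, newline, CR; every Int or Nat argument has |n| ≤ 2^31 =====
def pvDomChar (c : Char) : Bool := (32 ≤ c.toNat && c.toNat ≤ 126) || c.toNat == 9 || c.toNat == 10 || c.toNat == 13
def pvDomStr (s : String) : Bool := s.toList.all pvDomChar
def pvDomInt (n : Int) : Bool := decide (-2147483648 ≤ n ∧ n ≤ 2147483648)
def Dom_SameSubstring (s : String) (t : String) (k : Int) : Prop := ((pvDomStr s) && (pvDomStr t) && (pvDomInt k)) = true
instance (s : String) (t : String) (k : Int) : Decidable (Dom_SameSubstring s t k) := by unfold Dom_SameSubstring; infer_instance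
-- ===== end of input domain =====

-- B replaces A's two-pointer sliding window by prefix sums + binary search on the answer
-- length (an alternative algorithm, not claimed faster); equivalence proved on Pre_.

-- ===== PORT A =====
-- abs(ord(s[i]) - ord(t[i])); out-of-range access raises in Python (excluded by Pre_), here 0
def pvCostA (sl tl : List Char) (i : Nat) : Int :=
  match sl[i]?, tl[i]? with
  | some a, some b => |(a.toNat : Int) - (b.toNat : Int)|
  | _, _ => 0

-- the inner `while currentCost > k` loop; fuel exceeds the possible iteration count on Pre_
def pvShrinkA (sl tl : List Char) (k : Int) : Nat → Int → Nat → Int × Nat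
  | 0, cost, left => (cost, left)
  | fuel+1, cost, left =>
    if k < cost then pvShrinkA sl tl k fuel (cost - pvCostA sl tl left) (left + 1)
    else (cost, left)

def SameSubstring (s : String) (t : String) (k : Int) : Int :=
  let sl := s.toList
  let tl := t.toList
  let st := (List.range sl.length).foldl
    (fun (st : Nat × Int × Int) right =>
      let cost0 := st.2.1 + pvCostA sl tl right
      let p := pvShrinkA sl tl k (sl.length + 1) cost0 st.1
      (p.2, p.1, max st.2.2 ((right : Int) + 1 - (p.2 : Int))))
    (0, 0, 0)
  st.2.2

-- ===== PORT B =====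
def pvCostB (sl tl : List Char) (i : Nat) : Int :=
  match sl[i]?, tl[i]? with
  | some a, some b => |(a.toNat : Int) - (b.toNat : Int)|
  | _, _ => 0

def pvFeasibleB (pref : List Int) (k : Int) (n L : Nat) : Bool :=
  (List.range (n - L + 1)).any (fun i => decide (pref.getD (i + L) 0 - pref.getD i 0 ≤ k))

-- the `while lo < hi` loop; fuel exceeds the iteration count (each step shrinks hi - lo)
def pvBsearch (f : Nat → Bool) : Nat → Nat → Nat → Nat
  | 0, lo, _ => lo
  | fuel+1, lo, hi =>
    if lo < hi then
      let mid := (lo + hi + 1) / 2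
      if f mid then pvBsearch f fuel mid hi else pvBsearch f fuel lo (mid - 1)
    else lo

def SameSubstring_alt (s : String) (t : String) (k : Int) : Int :=
  let sl := s.toList
  let tl := t.toList
  let n := sl.length
  let costs := (List.range n).map (fun i => pvCostB sl tl i)
  let pref := costs.foldl (fun p x => p ++ [p.getLast! + x]) [0]
  ((pvBsearch (pvFeasibleB pref k n) (n + 1) 0 n : Nat) : Int)

-- ===== PRECONDITION & SPEC =====
-- Pre_ excludes inputs where Python A raises IndexError: t shorter than s, or k < 0 with s nonempty.
def Pre_SameSubstring (s : String) (t : String) (k : Int) : Prop :=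
  s.toList.length ≤ t.toList.length ∧ (0 ≤ k ∨ s = "")
instance (s : String) (t : String) (k : Int) : Decidable (Pre_SameSubstring s t k) := by
  unfold Pre_SameSubstring; infer_instance
def pvWitness_SameSubstring : String × String × Int := ("abc", "axc", 1)

def Spec_SameSubstring (s : String) (t : String) (k : Int) (out : Int) : Prop := out = SameSubstring_alt s t k
instance (s : String) (t : String) (k : Int) (out : Int) : Decidable (Spec_SameSubstring s t k out) := by unfold Spec_SameSubstring; infer_instance

-- ===== CLAIM (what is proved, stated in full; the proofs are below) =====
def Claim_equal_SameSubstring : Prop := ∀ (s : String) (t : String) (k : Int), Dom_SameSubstring s t k → Pre_SameSubstring s t k → Spec_SameSubstring s t k (SameSubstring s t k)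

-- ===== LEMMAS AND PROOFS =====

-- prefix sum of A's cost sequence
def pvP (sl tl : List Char) (i : Nat) : Int := ((List.range i).map (pvCostA sl tl)).sum

-- "some window of length L has cost ≤ k"
def pvF (sl tl : List Char) (k : Int) (n L : Nat) : Prop :=
  ∃ i, i + L ≤ n ∧ pvP sl tl (i + L) - pvP sl tl i ≤ k

theorem pvGetLast!_concat (l : List Int) (a : Int) : (l ++ [a]).getLast! = a := by
  induction l with
  | nil => rfl
  | cons x xs ih =>
    rcases xs with _ | ⟨y, ys⟩ <;> simp_all

theorem pvCostB_eq_A (sl tl : List Char) (i : Nat) : pvCostB sl tl i = pvCostA sl tl i := rfl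

theorem pvCost_nonneg (sl tl : List Char) (i : Nat) : 0 ≤ pvCostA sl tl i := by
  unfold pvCostA
  rcases sl[i]? with _ | a <;> rcases tl[i]? with _ | b <;> simp [abs_nonneg]

theorem pvP_succ (sl tl : List Char) (i : Nat) :
    pvP sl tl (i + 1) = pvP sl tl i + pvCostA sl tl i := by
  simp [pvP, List.range_succ]

theorem pvP_mono (sl tl : List Char) {a b : Nat} (h : a ≤ b) : pvP sl tl a ≤ pvP sl tl b := by
  induction b with
  | zero => simp_all
  | succ b ih =>
    rcases Nat.lt_or_ge a (b + 1) with h' | h'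
    · have := ih (by omega)
      have := pvCost_nonneg sl tl b
      rw [pvP_succ]; omega
    · have : a = b + 1 := by omega
      simp [this]

-- the foldl that builds `pref` produces the list of prefix sums
theorem pref_eq (sl tl : List Char) (n : Nat) :
    ((List.range n).map (fun i => pvCostB sl tl i)).foldl (fun p x => p ++ [p.getLast! + x]) [0]
      = (List.range (n + 1)).map (pvP sl tl) := by
  induction n with
  | zero => simp [pvP]
  | succ n ih =>
    rw [List.range_succ, List.map_append, List.foldl_append, ih]
    rw [List.range_succ (n := n + 1), List.map_append]
    simp only [List.foldl_cons, List.foldl_nil, List.map_cons, List.map_nil]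
    congr 1
    have hlast : ((List.range (n + 1)).map (pvP sl tl)).getLast! = pvP sl tl n := by
      rw [List.range_succ, List.map_append]
      exact pvGetLast!_concat _ _
    rw [hlast, pvCostB_eq_A, pvP_succ]

theorem pref_getD (sl tl : List Char) (n j : Nat) (h : j ≤ n) :
    ((List.range (n + 1)).map (pvP sl tl)).getD j 0 = pvP sl tl j := by
  rw [List.getD_eq_getElem?_getD, List.getElem?_map, List.getElem?_range (by omega)]
  rfl

theorem feasible_iff (sl tl : List Char) (k : Int) (n L : Nat) (hL : L ≤ n) :
    pvFeasibleB ((List.range (n + 1)).map (pvP sl tl)) k n L = true ↔ pvF sl tl k n L := by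
  unfold pvFeasibleB pvF
  rw [List.any_eq_true]
  constructor
  · rintro ⟨i, hi, hd⟩
    rw [List.mem_range] at hi
    rw [pref_getD sl tl n (i + L) (by omega), pref_getD sl tl n i (by omega)] at hd
    exact ⟨i, by omega, by simpa using hd⟩
  · rintro ⟨i, hi, hd⟩
    refine ⟨i, List.mem_range.mpr (by omega), ?_⟩
    rw [pref_getD sl tl n (i + L) (by omega), pref_getD sl tl n i (by omega)]
    simpa using hd

theorem pvF_anti (sl tl : List Char) (k : Int) (n : Nat) {a b : Nat} (h : a ≤ b)
    (hb : pvF sl tl k n b) : pvF sl tl k n a := by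
  obtain ⟨i, hi, hd⟩ := hb
  refine ⟨i, by omega, ?_⟩
  have := pvP_mono sl tl (a := i + a) (b := i + b) (by omega)
  omega

-- binary-search correctness: greatest value in [lo,hi] satisfying an antitone predicate
theorem pvBsearch_spec (f : Nat → Bool) (N : Nat)
    (anti : ∀ a b : Nat, a ≤ b → b ≤ N → f b = true → f a = true) :
    ∀ (fuel lo hi : Nat), lo ≤ hi → hi ≤ N → hi - lo < fuel → f lo = true →
      lo ≤ pvBsearch f fuel lo hi ∧ pvBsearch f fuel lo hi ≤ hi ∧
      f (pvBsearch f fuel lo hi) = true ∧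
      (∀ m, m ≤ hi → f m = true → m ≤ pvBsearch f fuel lo hi) := by
  intro fuel
  induction fuel with
  | zero => intro lo hi h1 _ h3 _; omega
  | succ fuel ih =>
    intro lo hi h1 hN h3 hlo
    rw [pvBsearch]
    by_cases hlt : lo < hi
    · simp only [hlt, if_true]
      cases hf : f ((lo + hi + 1) / 2) with
      | true =>
        simp only [if_true]
        obtain ⟨a, b, c, d⟩ := ih ((lo + hi + 1) / 2) hi (by omega) hN (by omega) hf
        exact ⟨by omega, b, c, d⟩
      | false =>
        simp only [Bool.false_eq_true, if_false]
        obtain ⟨a, b, c, d⟩ := ih lo ((lo + hi + 1) / 2 - 1) (by omega) (by omega) (by omega) hlo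
        refine ⟨a, by omega, c, ?_⟩
        intro m hm hfm
        rcases Nat.lt_or_ge m ((lo + hi + 1) / 2) with h' | h'
        · exact d m (by omega) hfm
        · exact absurd (anti _ m h' (by omega) hfm) (by simp [hf])
    · simp only [hlt, if_false]
      exact ⟨le_refl _, by omega, hlo, fun m hm hfm => by omega⟩

-- the inner while loop lands exactly on the least admissible left endpoint
theorem pvShrink_spec (sl tl : List Char) (k : Int) (C : Int) :
    ∀ (fuel left lstar : Nat), left ≤ lstar → lstar - left < fuel →
      C - pvP sl tl lstar ≤ k →
      (∀ l, left ≤ l → l < lstar → k < C - pvP sl tl l) →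
      pvShrinkA sl tl k fuel (C - pvP sl tl left) left = (C - pvP sl tl lstar, lstar) := by
  intro fuel
  induction fuel with
  | zero => intro left lstar h1 h2 _ _; omega
  | succ fuel ih =>
    intro left lstar h1 h2 hle hmin
    rw [pvShrinkA]
    rcases Nat.lt_or_ge left lstar with h' | h'
    · have hc : k < C - pvP sl tl left := hmin left (le_refl _) h'
      simp only [hc, if_true]
      have hstep : C - pvP sl tl left - pvCostA sl tl left = C - pvP sl tl (left + 1) := by
        rw [pvP_succ]; ring
      rw [hstep]
      exact ih (left + 1) lstar (by omega) (by omega) hle (fun l hl1 hl2 => hmin l (by omega) hl2)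
    · have heq : left = lstar := by omega
      subst heq
      have : ¬ k < C - pvP sl tl left := by omega
      simp only [this, if_false]

-- A's loop step, named for the induction
def pvStepA (sl tl : List Char) (k : Int) (st : Nat × Int × Int) (right : Nat) : Nat × Int × Int :=
  let cost0 := st.2.1 + pvCostA sl tl right
  let p := pvShrinkA sl tl k (sl.length + 1) cost0 st.1
  (p.2, p.1, max st.2.2 ((right : Int) + 1 - (p.2 : Int)))

theorem SameSubstring_eq_fold (s t : String) (k : Int) :
    SameSubstring s t k
      = ((List.range s.toList.length).foldl (pvStepA s.toList t.toList k) (0, 0, 0)).2.2 := rfl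

-- A's loop invariant
def pvInvA (sl tl : List Char) (k : Int) (r : Nat) (st : Nat × Int × Int) : Prop :=
  st.1 ≤ r ∧ st.2.1 = pvP sl tl r - pvP sl tl st.1 ∧ st.2.1 ≤ k ∧
  (∀ l, l < st.1 → k < pvP sl tl r - pvP sl tl l) ∧
  (∃ L i, i + L ≤ r ∧ pvP sl tl (i + L) - pvP sl tl i ≤ k ∧ st.2.2 = (L : Int)) ∧
  (∀ i L, i + L ≤ r → pvP sl tl (i + L) - pvP sl tl i ≤ k → (L : Int) ≤ st.2.2)

theorem pvInvA_holds (sl tl : List Char) (k : Int) (hk : 0 ≤ k) :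
    ∀ r : Nat, r ≤ sl.length →
      pvInvA sl tl k r ((List.range r).foldl (pvStepA sl tl k) (0, 0, 0)) := by
  intro r
  induction r with
  | zero =>
    intro _
    simp only [List.range_zero, List.foldl_nil]
    refine ⟨le_refl _, by simp, by simpa using hk, by intro l hl; omega,
      ⟨0, 0, by omega, by simpa [pvP] using hk, by norm_num⟩, ?_⟩
    intro i L h1 _
    have : L = 0 := by omega
    simp [this]
  | succ r ih =>
    intro hr
    obtain ⟨h1, h2, h3, h4, ⟨L0, i0, hw1, hw2, hw3⟩, hup⟩ := ih (by omega)
    set st := (List.range r).foldl (pvStepA sl tl k) (0, 0, 0) with hst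
    rw [List.range_succ, List.foldl_append, List.foldl_cons, List.foldl_nil]
    have hex : ∃ l, st.1 ≤ l ∧ pvP sl tl (r + 1) - pvP sl tl l ≤ k := ⟨r + 1, by omega, by omega⟩
    set lstar := Nat.find hex with hlstar
    obtain ⟨hls1, hls2⟩ := Nat.find_spec hex
    have hlsub : lstar ≤ r + 1 := Nat.find_min' hex ⟨by omega, by omega⟩
    have hmin : ∀ l, st.1 ≤ l → l < lstar → k < pvP sl tl (r + 1) - pvP sl tl l := by
      intro l hl1 hl2
      have := Nat.find_min hex hl2
      push_neg at this
      exact lt_of_not_ge fun hcon => absurd (this hl1) (by omega)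
    have hcost0 : st.2.1 + pvCostA sl tl r = pvP sl tl (r + 1) - pvP sl tl st.1 := by
      rw [h2, pvP_succ]; ring
    have hshrink : pvShrinkA sl tl k (sl.length + 1) (st.2.1 + pvCostA sl tl r) st.1
        = (pvP sl tl (r + 1) - pvP sl tl lstar, lstar) := by
      rw [hcost0]
      exact pvShrink_spec sl tl k (pvP sl tl (r + 1)) (sl.length + 1) st.1 lstar hls1
        (by omega) hls2 hmin
    show pvInvA sl tl k (r + 1) (pvStepA sl tl k st r)
    simp only [pvStepA]
    rw [hshrink]
    have hcr := pvCost_nonneg sl tl r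
    have hPsucc := pvP_succ sl tl r
    refine ⟨hlsub, rfl, hls2, ?_, ?_, ?_⟩
    · intro l hl
      rcases Nat.lt_or_ge l st.1 with h' | h'
      · have := h4 l h'; omega
      · exact hmin l h' hl
    · rcases max_choice st.2.2 ((r : Int) + 1 - (lstar : Int)) with hm | hm <;> rw [hm]
      · exact ⟨L0, i0, by omega, hw2, hw3⟩
      · refine ⟨r + 1 - lstar, lstar, by omega, ?_, ?_⟩
        · have : lstar + (r + 1 - lstar) = r + 1 := by omega
          rw [this]; exact hls2
        · push_cast [Nat.cast_sub hlsub]; ring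
    · intro i L hiL hcost
      rcases Nat.lt_or_ge (i + L) (r + 1) with h' | h'
      · have := hup i L (by omega) hcost
        exact le_trans this (le_max_left _ _)
      · have hiLr : i + L = r + 1 := by omega
        have hi_ge : st.1 ≤ i := by
          by_contra hcon
          rw [Nat.not_le] at hcon
          have h5 := h4 i hcon
          rw [hiLr] at hcost
          omega
        have hlsi : lstar ≤ i := Nat.find_min' hex ⟨hi_ge, by rw [← hiLr]; exact hcost⟩
        refine le_trans ?_ (le_max_right st.2.2 ((r : Int) + 1 - (lstar : Int)))
        have : (L : Int) = (r : Int) + 1 - (i : Int) := by omega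
        rw [this]
        have : (lstar : Int) ≤ (i : Int) := by exact_mod_cast hlsi
        omega

-- ===== VERDICT (by name: the statement is the Claim_ definition above) =====
theorem SameSubstring_spec : Claim_equal_SameSubstring := by
  intro s t k _ hpre
  unfold Spec_SameSubstring
  rcases hpre with ⟨_, hk | hs⟩
  · -- main case: 0 ≤ k
    obtain ⟨_, _, _, _, ⟨L0, i0, hw1, hw2, hw3⟩, hup⟩ :=
      pvInvA_holds s.toList t.toList k hk s.toList.length (le_refl _)
    have halt : SameSubstring_alt s t k
        = ((pvBsearch (pvFeasibleB ((List.range (s.toList.length + 1)).map (pvP s.toList t.toList)) k s.toList.length) (s.toList.length + 1) 0 s.toList.length : Nat) : Int) := by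
      simp only [SameSubstring_alt]
      rw [pref_eq]
    set sl := s.toList with hsl
    set tl := t.toList with htl
    set n := sl.length with hn
    set f := pvFeasibleB ((List.range (n + 1)).map (pvP sl tl)) k n with hf
    have hanti : ∀ a b : Nat, a ≤ b → b ≤ n → f b = true → f a = true := by
      intro a b hab hbn hfb
      rw [hf, feasible_iff sl tl k n b hbn] at hfb
      rw [hf, feasible_iff sl tl k n a (by omega)]
      exact pvF_anti sl tl k n hab hfb
    have hf0 : f 0 = true := by
      rw [hf, feasible_iff sl tl k n 0 (by omega)]
      exact ⟨0, by omega, by simpa [pvP] using hk⟩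
    obtain ⟨_, hb2, hb3, hb4⟩ :=
      pvBsearch_spec f n hanti (n + 1) 0 n (by omega) (le_refl _) (by omega) hf0
    set r := pvBsearch f (n + 1) 0 n with hrdef
    rw [SameSubstring_eq_fold, halt]
    simp only [← hsl, ← htl]
    simp only [← hn]
    rw [hf, feasible_iff sl tl k n r hb2] at hb3
    obtain ⟨ir, hir1, hir2⟩ := hb3
    have hle1 : ((List.range n).foldl (pvStepA sl tl k) (0, 0, 0)).2.2 ≤ (r : Int) := by
      rw [hw3]
      have : f L0 = true := by
        rw [hf, feasible_iff sl tl k n L0 (by omega)]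
        exact ⟨i0, hw1, hw2⟩
      exact_mod_cast hb4 L0 (by omega) this
    have hle2 : (r : Int) ≤ ((List.range n).foldl (pvStepA sl tl k) (0, 0, 0)).2.2 :=
      hup ir r hir1 hir2
    omega
  · -- s = "": both sides are 0
    subst hs
    show SameSubstring "" t k = SameSubstring_alt "" t k
    simp [SameSubstring, SameSubstring_alt, pvBsearch]
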